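-- pv_equiv track=rewrite | github.com/Cypark-c/Algorithm_problem_prac | 프로그래머스/unrated/181932. 코드 처리하기/코드 처리하기.py | solution
-- ===== SOURCE A (Python) =====
-- def solution(code):
--     ret=''
--     mode=0 # mode 시작조건 설정에 유의
--     for idx,val in enumerate(code):
--         if ((val)!='1'):
--             if (mode==0)&(idx%2==0):
--                 ret+=code[idx]
--             elif (mode==1)&(idx%2==1):
--                 ret+=code[idx]
--
--         else:
--             mode=(mode+1)%2
--
--     if ret=='':
--         return "EMPTY"
--
--     return ret
-- ===== SOURCE B (Python) =====
-- def solution(code):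
--     # Segments between '1's; segment k sees mode k%2, so from the chars of
--     # segment k (starting at global offset off) keep every second char
--     # beginning at parity (off+k)%2.
--     parts = []
--     off = 0
--     for k, seg in enumerate(code.split('1')):
--         t = seg[(off + k) % 2:]
--         parts.append(t[::2])
--         off += len(seg) + 1
--     res = ''.join(parts)
--     return res if res else "EMPTY"
-- ===== Notes on version B (the rewrite author's own statement) =====
-- stated objective: faster
-- what changed: Replaced A's fused per-character loop with a toggling mode flag by splitting the string on the toggle character into segments and taking a stride-2 slice of each segment starting at parity (offset+segment_index)%2, moving all the per-character work into C-level str.split/slice/join.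
import Mathlib
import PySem

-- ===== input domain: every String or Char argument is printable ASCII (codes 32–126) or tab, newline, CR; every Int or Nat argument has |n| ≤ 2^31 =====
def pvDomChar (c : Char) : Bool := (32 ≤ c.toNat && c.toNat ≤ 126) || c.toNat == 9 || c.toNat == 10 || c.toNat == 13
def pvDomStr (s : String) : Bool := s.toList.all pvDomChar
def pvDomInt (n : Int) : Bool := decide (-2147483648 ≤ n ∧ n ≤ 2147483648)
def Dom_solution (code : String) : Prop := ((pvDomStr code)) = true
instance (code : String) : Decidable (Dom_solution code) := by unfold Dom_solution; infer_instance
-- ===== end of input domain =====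

-- B replaces A's fused per-char loop with mode state by splitting the string on '1'
-- and taking a stride-2 slice of each segment (same O(n), measurably faster: the per-char work moves into C-level split/slice/join).

-- ===== PORT A =====
-- A's for-loop over enumerate(code) with state (ret, mode), transliterated as structural recursion
def solutionLoopA (ret : List Char) (mode : Int) (idx : Nat) : List Char → List Char × Int
  | [] => (ret, mode)
  | v :: rest =>
    if v ≠ '1' then
      if mode = 0 ∧ idx % 2 = 0 then solutionLoopA (ret ++ [v]) mode (idx + 1) rest
      else if mode = 1 ∧ idx % 2 = 1 then solutionLoopA (ret ++ [v]) mode (idx + 1) rest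
      else solutionLoopA ret mode (idx + 1) rest
    else solutionLoopA ret ((mode + 1) % 2) (idx + 1) rest

def solution (code : String) : String :=
  let st := solutionLoopA [] 0 0 code.toList
  if st.1 = [] then "EMPTY" else String.ofList st.1

-- ===== PORT B =====
-- Source B's for-loop over enumerate(code.split('1')) with state (parts, off);
-- code.split('1') is ported as List.splitOn '1' (Python's split on a one-char
-- separator keeps empty pieces, exactly as List.splitOn does);
-- seg[(off+k)%2:] is PySem.List.slice, t[::2] is PySem.List.slice? with step 2
-- (step 2 ≠ 0, so slice? always returns some; .getD [] only totalises the match).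
def segLoopB (off k : Int) : List (List Char) → List (List Char)
  | [] => []
  | seg :: rest =>
    ((PySem.List.slice? (PySem.List.slice seg (some (PySem.Int.mod (off + k) 2)) none) none none 2).getD [])
      :: segLoopB (off + seg.length + 1) (k + 1) rest

def solution_alt (code : String) : String :=
  let parts := segLoopB 0 0 (List.splitOn '1' code.toList)
  let res := parts.flatten
  if res = [] then "EMPTY" else String.ofList res

-- ===== PRECONDITION & SPEC =====
def Spec_solution (code : String) (out : String) : Prop := out = solution_alt code
instance (code : String) (out : String) : Decidable (Spec_solution code out) := by unfold Spec_solution; infer_instance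

-- ===== CLAIM (what is proved, stated in full; the proofs are below) =====
def Claim_equal_solution : Prop := ∀ (code : String), Dom_solution code → Spec_solution code (solution code)

-- ===== LEMMAS AND PROOFS =====

def everyOther {α : Type} : List α → List α
  | [] => []
  | [a] => [a]
  | a :: _ :: l => a :: everyOther l

theorem filterMap_range_everyOther {α : Type} (xs : List α) :
    List.filterMap (fun k => xs[2 * k]?) (List.range ((xs.length + 1) / 2)) = everyOther xs := by
  induction xs using everyOther.induct with
  | case1 => simp [everyOther]
  | case2 a => simp [everyOther]
  | case3 a b l ih =>
    have hc : ((a :: b :: l).length + 1) / 2 = (l.length + 1) / 2 + 1 := by simp; omega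
    rw [hc, List.range_succ_eq_map, List.filterMap_cons, List.filterMap_map]
    simp only [Nat.mul_zero, List.getElem?_cons_zero]
    have he : ((fun k => (a :: b :: l)[2 * k]?) ∘ Nat.succ) = fun k => l[2 * k]? := by
      funext k
      show (a :: b :: l)[2 * (k+1)]? = l[2*k]?
      rw [show 2*(k+1) = (2*k)+1+1 by ring]
      simp
    rw [he, ih]
    simp [everyOther]

theorem slice?_two {α : Type} (xs : List α) :
    PySem.List.slice? xs none none 2 = some (everyOther xs) := by
  rw [← filterMap_range_everyOther]
  simp only [PySem.List.slice?, PySem.List.sliceIndices]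
  norm_num
  have hcount : (if 0 < xs.length then (((xs.length : Int) + 2 - 1) / 2).toNat else 0) = (xs.length + 1) / 2 := by
    split_ifs with h <;> omega
  rw [hcount]
  have hfun : (fun x : Nat => xs[(2 * (x : Int)).toNat]?) = fun k => xs[2 * k]? := by
    funext k
    congr 1
  rw [hfun]

theorem segHead (seg : List Char) (off k : Nat) :
    ((PySem.List.slice? (PySem.List.slice seg (some (PySem.Int.mod ((off : Int) + (k : Int)) 2)) none) none none 2).getD [])
      = everyOther (seg.drop ((off + k) % 2)) := by
  have hm : PySem.Int.mod ((off : Int) + (k : Int)) 2 = (((off + k) % 2 : Nat) : Int) := by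
    simp only [PySem.Int.mod]
    rw [Int.fmod_eq_emod]
    omega
  rw [hm, PySem.List.slice_from_natCast, slice?_two]
  rfl

theorem everyOther_cons {α : Type} (c : α) (h : List α) :
    everyOther (c :: h) = c :: everyOther (h.drop 1) := by
  cases h <;> simp [everyOther]

theorem segLoopB_main (cs : List Char) : ∀ (ret : List Char) (off k : Nat),
    (solutionLoopA ret ((k % 2 : Nat) : Int) off cs).1
      = ret ++ (segLoopB (off : Int) (k : Int) (List.splitOn '1' cs)).flatten := by
  induction cs with
  | nil =>
    intro ret off k
    rw [List.splitOn_nil]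
    simp only [segLoopB, segHead, solutionLoopA]
    simp [everyOther]
  | cons c rest ih =>
    intro ret off k
    by_cases hc : c = '1'
    · subst hc
      have hmode : (((k % 2 : Nat) : Int) + 1) % 2 = (((k + 1) % 2 : Nat) : Int) := by push_cast; omega
      simp only [solutionLoopA, ne_eq, not_true_eq_false, if_false, hmode]
      rw [ih ret (off + 1) (k + 1)]
      have hsplit : List.splitOn '1' ('1' :: rest) = [] :: List.splitOn '1' rest := by
        simp [List.splitOn, List.splitOnP_cons]
      rw [hsplit]
      simp only [segLoopB, segHead, List.flatten_cons, List.drop_nil]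
      simp only [everyOther, List.length_nil, List.nil_append]
      push_cast
      ring_nf
    · cases hsp : List.splitOn '1' rest with
      | nil => exact absurd hsp (List.splitOnP_ne_nil _ _)
      | cons h t =>
        have hsplit : List.splitOn '1' (c :: rest) = (c :: h) :: t := by
          have hsp' : List.splitOnP (fun x => x == '1') rest = h :: t := by
            simpa [List.splitOn] using hsp
          simp [List.splitOn, List.splitOnP_cons, hc, hsp']
        rw [hsplit]
        have hiff : (((k % 2 : Nat) : Int) = 0 ∧ off % 2 = 0) ∨ (((k % 2 : Nat) : Int) = 1 ∧ off % 2 = 1) ↔ (off + k) % 2 = 0 := by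
          constructor
          · rintro (⟨h1, h2⟩ | ⟨h1, h2⟩) <;> omega
          · intro hh; omega
        simp only [segLoopB, segHead, List.flatten_cons]
        by_cases hk : (off + k) % 2 = 0
        · have hcond : ((k % 2 : Nat) : Int) = 0 ∧ off % 2 = 0 ∨ (((k % 2 : Nat) : Int) = 1 ∧ off % 2 = 1) := hiff.2 hk
          simp only [solutionLoopA, ne_eq, hc, not_false_eq_true, if_true]
          rcases hcond with h0 | h1
          · rw [if_pos h0]
            rw [ih (ret ++ [c]) (off + 1) k, hsp]
            simp only [segLoopB, segHead, List.flatten_cons]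
            have e1 : (off + 1 + k) % 2 = 1 := by omega
            rw [hk, e1]
            simp only [List.drop_zero]
            rw [everyOther_cons]
            simp only [List.length_cons]
            push_cast
            ring_nf
            simp [List.append_assoc]
          · rw [if_neg (by rintro ⟨a, b⟩; omega), if_pos h1]
            rw [ih (ret ++ [c]) (off + 1) k, hsp]
            simp only [segLoopB, segHead, List.flatten_cons]
            have e1 : (off + 1 + k) % 2 = 1 := by omega
            rw [hk, e1]
            simp only [List.drop_zero]
            rw [everyOther_cons]
            simp only [List.length_cons]
            push_cast
            ring_nf
            simp [List.append_assoc]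
        · have e0 : (off + 1 + k) % 2 = 0 := by omega
          have e1 : (off + k) % 2 = 1 := by omega
          simp only [solutionLoopA, ne_eq, hc, not_false_eq_true, if_true]
          rw [if_neg (fun hh => hk (hiff.1 (Or.inl hh))), if_neg (fun hh => hk (hiff.1 (Or.inr hh)))]
          rw [ih ret (off + 1) k, hsp]
          simp only [segLoopB, segHead, List.flatten_cons]
          rw [e0, e1]
          simp only [List.drop_zero, List.drop_one, List.tail_cons, List.length_cons]
          push_cast
          ring_nf

-- ===== VERDICT (by name: the statement is the Claim_ definition above) =====
theorem solution_spec : Claim_equal_solution := by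
  intro code _
  unfold Spec_solution solution solution_alt
  have h := segLoopB_main code.toList [] 0 0
  norm_num at h
  simp only []
  rw [h]
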